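-- pv_equiv track=rewrite | github.com/lmrae0624/Algorithm | 프로그래머스/Test_0326_5.py | solution
-- ===== SOURCE A (Python) =====
-- def solution(arr, brr):
--     answer = 0
--
--     for i in range(len(arr)-1):
--         diff=brr[i]-arr[i] #원소 차이 저장
--
--         if diff==0: #차이가 없을 경우 continue
--             continue
--
--         answer+=1 #셀 너비조절 횟수+1
--         arr[i+1]-=diff #다음 셀의 경우 움직인 만큼 영향 받기 때문에 값 변경
--
--     return answer
-- ===== SOURCE B (Python) =====
-- def solution(arr, brr):
--     # Return-value re-implementation: the count equals the number of indices
--     # i < len(arr)-1 at which the running prefix sum of (brr - arr) differences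
--     # (taken over the ORIGINAL arr) is nonzero.  Unlike A, B does not mutate arr.
--     diffs = [b - a for a, b in zip(arr, brr)][:len(arr) - 1]
--     answer = 0
--     carry = 0
--     for d in diffs:
--         carry += d
--         if carry != 0:
--             answer += 1
--     return answer
-- ===== Notes on version B (the rewrite author's own statement) =====
-- stated objective: simpler
-- what changed: B replaces A's in-place mutation of arr (writing each diff into the next cell and re-reading it) by a pure single pass over precomputed original differences brr[i]-arr[i] with an explicit running carry, counting the indices where the carry is nonzero; B never mutates arr.
import Mathlib
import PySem

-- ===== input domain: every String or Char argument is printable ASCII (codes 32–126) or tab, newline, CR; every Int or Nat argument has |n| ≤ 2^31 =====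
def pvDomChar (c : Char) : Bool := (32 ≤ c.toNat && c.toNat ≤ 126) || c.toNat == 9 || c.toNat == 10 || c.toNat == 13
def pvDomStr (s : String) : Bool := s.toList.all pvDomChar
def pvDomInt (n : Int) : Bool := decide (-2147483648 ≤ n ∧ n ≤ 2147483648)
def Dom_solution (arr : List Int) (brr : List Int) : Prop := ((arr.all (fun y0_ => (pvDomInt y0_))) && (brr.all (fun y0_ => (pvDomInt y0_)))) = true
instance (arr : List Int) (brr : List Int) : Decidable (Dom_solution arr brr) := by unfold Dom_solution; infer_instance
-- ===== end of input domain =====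

-- B replaces A's in-place mutation/read-back of arr by a pure single pass over the
-- precomputed original differences with an explicit running carry (simpler; return
-- value only: A mutates arr in place, B does not).

-- ===== PORT A =====
-- loop body of A: state = (answer, current arr)
def stepA (brr : List Int) (st : Int × List Int) (i : Int) : Int × List Int :=
  let diff := PySem.List.pyGetD brr i 0 - PySem.List.pyGetD st.2 i 0
  if diff = 0 then st
  else (st.1 + 1,
    PySem.List.pySetD st.2 (i + 1) (PySem.List.pyGetD st.2 (i + 1) 0 - diff))

def solution (arr : List Int) (brr : List Int) : Int :=
  ((PySem.List.pyRange 0 ((arr.length : Int) - 1) 1).foldl (stepA brr) (0, arr)).1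

-- ===== PORT B =====
-- loop body of B: state = (answer, carry)
def stepB (st : Int × Int) (d : Int) : Int × Int :=
  let carry := st.2 + d
  (st.1 + (if carry ≠ 0 then 1 else 0), carry)

def solution_alt (arr : List Int) (brr : List Int) : Int :=
  let diffs := PySem.List.slice ((arr.zip brr).map (fun p => p.2 - p.1))
                 none (some ((arr.length : Int) - 1))
  (diffs.foldl stepB (0, 0)).1

-- ===== PRECONDITION & SPEC =====
-- Pre_ excludes exactly the inputs where A raises IndexError reading brr[i].
def Pre_solution (arr : List Int) (brr : List Int) : Prop := arr.length ≤ brr.length + 1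
instance (arr : List Int) (brr : List Int) : Decidable (Pre_solution arr brr) := by unfold Pre_solution; infer_instance
def pvWitness_solution : List Int × List Int := ([1, 2, 3], [2, 2, 3])


def Spec_solution (arr : List Int) (brr : List Int) (out : Int) : Prop := out = solution_alt arr brr
instance (arr : List Int) (brr : List Int) (out : Int) : Decidable (Spec_solution arr brr out) := by unfold Spec_solution; infer_instance

-- ===== CLAIM (what is proved, stated in full; the proofs are below) =====
def Claim_equal_solution : Prop := ∀ (arr : List Int) (brr : List Int), Dom_solution arr brr → Pre_solution arr brr → Spec_solution arr brr (solution arr brr)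

-- ===== LEMMAS AND PROOFS =====

-- Main loop correspondence: A's fold over indices k..n-2 on the mutated array
-- equals B's fold over the original differences, given the carry invariant.
lemma loop_eq (arr brr : List Int) (n : Nat) :
    ∀ (m k : Nat) (a : List Int) (ans c : Int),
      k + m + 1 = n →
      a.length = n →
      (∀ j : Nat, k < j → j < n → a.getD j 0 = arr.getD j 0) →
      a.getD k 0 = arr.getD k 0 - c →
      ((PySem.List.pyRange (k : Int) ((n : Int) - 1) 1).foldl (stepA brr) (ans, a)).1
        = (((List.range' k m).map
              (fun j => brr.getD j 0 - arr.getD j 0)).foldl stepB (ans, c)).1 := by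
  intro m
  induction m with
  | zero =>
    intro k a ans c hk hlen _ _
    rw [PySem.List.pyRange_one_eq_nil (by omega)]
    rfl
  | succ m ih =>
    intro k a ans c hk hlen hrest hk0
    have hlt : (k : Int) < (n : Int) - 1 := by omega
    rw [PySem.List.pyRange_one_cons hlt]
    have hbk : PySem.List.pyGetD brr (k : Int) 0 = brr.getD k 0 := by
      simp [PySem.List.pyGetD_natCast]
    have hak : PySem.List.pyGetD a (k : Int) 0 = a.getD k 0 := by
      simp [PySem.List.pyGetD_natCast]
    -- the diff A computes equals B's new carry
    set c' : Int := c + (brr.getD k 0 - arr.getD k 0) with hc'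
    have hdiff : PySem.List.pyGetD brr (k : Int) 0 - PySem.List.pyGetD a (k : Int) 0 = c' := by
      rw [hbk, hak, hk0]; ring
    -- B's list: peel the first element
    have hlist : (List.range' k (m + 1)).map
          (fun j => brr.getD j 0 - arr.getD j 0)
        = (brr.getD k 0 - arr.getD k 0)
          :: (List.range' (k + 1) m).map (fun j => brr.getD j 0 - arr.getD j 0) := by
      rw [List.range'_succ, List.map_cons]
    rw [hlist]
    simp only [List.foldl_cons]
    have hstepB : stepB (ans, c) (brr.getD k 0 - arr.getD k 0)
        = (ans + (if c' ≠ 0 then 1 else 0), c') := by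
      simp [stepB, hc']
    rw [hstepB]
    have hcast : (k : Int) + 1 = ((k + 1 : Nat) : Int) := by push_cast; ring
    by_cases hz : c' = 0
    · -- diff = 0: A leaves the state untouched
      have hA : stepA brr (ans, a) (k : Int) = (ans, a) := by
        simp only [stepA]
        rw [hdiff, if_pos hz]
      rw [hA]
      simp only [hz, ne_eq, not_true_eq_false, if_false, add_zero]
      rw [show ((k : Int) + 1) = ((k + 1 : Nat) : Int) from hcast]
      apply ih (k + 1) a ans 0 (by omega) hlen
      · intro j hj1 hj2; exact hrest j (by omega) hj2
      · rw [sub_zero]; exact hrest (k + 1) (by omega) (by omega)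
    · -- diff ≠ 0: A writes arr[k+1] -= diff, B just carries c'
      have hA : stepA brr (ans, a) (k : Int)
          = (ans + 1, PySem.List.pySetD a ((k : Int) + 1) (PySem.List.pyGetD a ((k : Int) + 1) 0 - c')) := by
        simp only [stepA]
        rw [hdiff, if_neg hz]
      rw [hA]
      have hset : PySem.List.pySetD a ((k : Int) + 1) (PySem.List.pyGetD a ((k : Int) + 1) 0 - c')
          = a.set (k + 1) (a.getD (k + 1) 0 - c') := by
        rw [hcast, PySem.List.pySetD_natCast]
        congr 1
        rw [PySem.List.pyGetD_natCast]
      rw [hset]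
      simp only [hz, ne_eq, not_false_eq_true, if_true]
      set a' := a.set (k + 1) (a.getD (k + 1) 0 - c') with ha'
      have hlen' : a'.length = n := by simp [ha', hlen]
      have hk1n : k + 1 < n := by omega
      rw [show ((k : Int) + 1) = ((k + 1 : Nat) : Int) from hcast]
      apply ih (k + 1) a' (ans + 1) c' (by omega) hlen'
      · intro j hj1 hj2
        have : a'.getD j 0 = a.getD j 0 := by
          have hne : k + 1 ≠ j := by omega
          simp [ha', List.getD, List.getElem?_set_ne hne]
        rw [this]; exact hrest j (by omega) hj2
      · have : a'.getD (k + 1) 0 = a.getD (k + 1) 0 - c' := by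
          simp [ha', List.getD, hlen, hk1n]
        rw [this, hrest (k + 1) (by omega) hk1n]

-- B's sliced diff list is exactly the index-mapped difference list
lemma diffs_eq (arr brr : List Int) (n : Nat) (hn : n = arr.length) (h1 : 1 ≤ n)
    (hbrr : n ≤ brr.length + 1) :
    PySem.List.slice ((arr.zip brr).map (fun p => p.2 - p.1)) none (some ((arr.length : Int) - 1))
      = (List.range (n - 1)).map (fun j => brr.getD j 0 - arr.getD j 0) := by
  have hcast : (arr.length : Int) - 1 = ((n - 1 : Nat) : Int) := by omega
  rw [hcast, PySem.List.slice_to_natCast]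
  apply List.ext_getElem
  · simp [List.length_take, List.length_zip, ← hn]; omega
  · intro i h1i h2i
    have hi : i < n - 1 := by
      simp [List.length_take, List.length_zip, ← hn] at h1i; omega
    have hia : i < arr.length := by omega
    have hib : i < brr.length := by omega
    simp [List.getElem_take, List.getElem_map, List.getElem_zip, List.getElem_range,
      List.getD, hia, hib]

lemma solution_eq (arr brr : List Int) (hpre : arr.length ≤ brr.length + 1) :
    solution arr brr = solution_alt arr brr := by
  rcases Nat.eq_zero_or_pos arr.length with h0 | h1
  · have harr : arr = [] := List.eq_nil_of_length_eq_zero h0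
    subst harr
    simp [solution, solution_alt, PySem.List.pyRange, PySem.List.slice]
  · unfold solution solution_alt
    rw [diffs_eq arr brr arr.length rfl h1 hpre, List.range_eq_range']
    have := loop_eq arr brr arr.length (arr.length - 1) 0 arr 0 0
      (by omega) rfl (by intro j _ _; rfl) (by simp)
    simpa using this

-- ===== VERDICT (by name: the statement is the Claim_ definition above) =====
theorem solution_spec : Claim_equal_solution := by
  intro arr brr _ hpre
  unfold Spec_solution
  exact solution_eq arr brr hpre
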